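-- pv_equiv track=rewrite | github.com/sdsdsdsdaf/Code | 충돌위험.py | countNumberOfCollisionInSametime
-- ===== SOURCE A (Python) =====
-- def countNumberOfCollisionInSametime(routes, time):
--     collison_points = []
--     same_time_postion = []
--
--     for i in range(len(routes)):
--         if len(routes[i]) > time:
--             same_time_postion.append(routes[i][time])
--
--
--     for i, position in enumerate(same_time_postion):
--         same_time_postion.pop(i)
--
--         if position in same_time_postion and not position in collison_points:
--             collison_points.append(position)
--
--         same_time_postion.insert(i, position) #원상복귀
--
--
--     return len(collison_points)
-- ===== SOURCE B (Python) =====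
-- def countNumberOfCollisionInSametime(routes, time):
--     positions = [route[time] for route in routes if len(route) > time]
--     seen = set()
--     dups = set()
--     for p in positions:
--         if p in seen:
--             dups.add(p)
--         else:
--             seen.add(p)
--     return len(dups)
-- ===== Notes on version B (the rewrite author's own statement) =====
-- stated objective: simpler
-- what changed: Replaces the pop/membership-scan/insert loop over the positions list with a single pass that tracks a 'seen' set and a 'dups' set and returns the size of the duplicate set.
import Mathlib
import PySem

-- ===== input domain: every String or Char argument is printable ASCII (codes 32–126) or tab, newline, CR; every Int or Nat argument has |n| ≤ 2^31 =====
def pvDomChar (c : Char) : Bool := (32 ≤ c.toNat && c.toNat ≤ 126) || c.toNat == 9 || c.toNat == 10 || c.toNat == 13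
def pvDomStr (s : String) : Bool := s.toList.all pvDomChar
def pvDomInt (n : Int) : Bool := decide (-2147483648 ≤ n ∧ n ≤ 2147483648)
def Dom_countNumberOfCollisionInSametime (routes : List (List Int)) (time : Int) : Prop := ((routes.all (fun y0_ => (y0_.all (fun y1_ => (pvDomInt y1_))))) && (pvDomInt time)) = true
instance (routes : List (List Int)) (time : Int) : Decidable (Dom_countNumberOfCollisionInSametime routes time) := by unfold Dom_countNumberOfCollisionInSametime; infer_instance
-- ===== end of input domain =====

-- B replaces A's pop/membership-scan/insert duplicate-detection loop by a single pass with a seen-set and a dup-set (objective: simpler).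

-- ===== PORT A =====
def countNumberOfCollisionInSametime (routes : List (List Int)) (time : Int) : Int :=
  let same_time_postion : List Int :=
    (PySem.List.pyRange 0 (routes.length : Int) 1).foldl
      (fun acc i =>
        if time < ((PySem.List.pyGetD routes i []).length : Int) then
          acc ++ [PySem.List.pyGetD (PySem.List.pyGetD routes i []) time 0]
        else acc) []
  let st :=
    (PySem.List.enumerate same_time_postion 0).foldl
      (fun (st : List Int × List Int) ip =>
        match PySem.List.pop? st.1 ip.1 with
        | some pr =>
            let s' := pr.2
            let cps := if s'.contains ip.2 && !(st.2.contains ip.2) then st.2 ++ [ip.2] else st.2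
            (PySem.List.insert s' ip.1 ip.2, cps)
        | none => st)
      (same_time_postion, [])
  (st.2.length : Int)

-- ===== PORT B =====
def countNumberOfCollisionInSametime_alt (routes : List (List Int)) (time : Int) : Int :=
  let positions : List Int :=
    routes.foldl (fun acc r => if time < (r.length : Int) then acc ++ [PySem.List.pyGetD r time 0] else acc) []
  let st :=
    positions.foldl
      (fun (st : PySem.Set Int × PySem.Set Int) p =>
        if PySem.Set.contains st.1 p then (st.1, PySem.Set.add st.2 p)
        else (PySem.Set.add st.1 p, st.2))
      (PySem.Set.empty, PySem.Set.empty)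
  PySem.Set.len st.2

-- ===== PRECONDITION & SPEC =====
-- Pre_ excludes exactly the inputs where the Python A (and B alike) raises IndexError:
-- a negative time together with some route shorter than |time| (the guard len(route) > time passes, route[time] raises).
def Pre_countNumberOfCollisionInSametime (routes : List (List Int)) (time : Int) : Prop :=
  ∀ r ∈ routes, time < (r.length : Int) → -(r.length : Int) ≤ time

instance (routes : List (List Int)) (time : Int) : Decidable (Pre_countNumberOfCollisionInSametime routes time) := by
  unfold Pre_countNumberOfCollisionInSametime; infer_instance

def pvWitness_countNumberOfCollisionInSametime : List (List Int) × Int := ([[1, 2], [3, 1], [1, 5]], 0)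

def Spec_countNumberOfCollisionInSametime (routes : List (List Int)) (time : Int) (out : Int) : Prop := out = countNumberOfCollisionInSametime_alt routes time
instance (routes : List (List Int)) (time : Int) (out : Int) : Decidable (Spec_countNumberOfCollisionInSametime routes time out) := by unfold Spec_countNumberOfCollisionInSametime; infer_instance

-- ===== CLAIM (what is proved, stated in full; the proofs are below) =====
def Claim_equal_countNumberOfCollisionInSametime : Prop := ∀ (routes : List (List Int)) (time : Int), Dom_countNumberOfCollisionInSametime routes time → Pre_countNumberOfCollisionInSametime routes time → Spec_countNumberOfCollisionInSametime routes time (countNumberOfCollisionInSametime routes time)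

-- ===== LEMMAS AND PROOFS =====
def pvPos (routes : List (List Int)) (time : Int) : List Int :=
  routes.foldl (fun acc r => if time < (r.length : Int) then acc ++ [PySem.List.pyGetD r time 0] else acc) []

def pvStepA (st : List Int × List Int) (ip : Int × Int) : List Int × List Int :=
  match PySem.List.pop? st.1 ip.1 with
  | some pr =>
      let s' := pr.2
      let cps := if s'.contains ip.2 && !(st.2.contains ip.2) then st.2 ++ [ip.2] else st.2
      (PySem.List.insert s' ip.1 ip.2, cps)
  | none => st

def pvStepS (s c : List Int) (p : Int) : List Int :=
  if 2 ≤ List.count p s ∧ p ∉ c then c ++ [p] else c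

def pvStepB (st : PySem.Set Int × PySem.Set Int) (p : Int) : PySem.Set Int × PySem.Set Int :=
  if PySem.Set.contains st.1 p then (st.1, PySem.Set.add st.2 p)
  else (PySem.Set.add st.1 p, st.2)

lemma pv_split (s : List Int) (k : Nat) (h : k < s.length) :
    s.take k ++ s[k] :: s.drop (k+1) = s := by
  rw [List.getElem_cons_drop, List.take_append_drop]

lemma pv_mem_eraseIdx (s : List Int) (k : Nat) (h : k < s.length) :
    s[k] ∈ s.eraseIdx k ↔ 2 ≤ List.count s[k] s := by
  set x := s[k] with hx
  have hc : List.count x s = List.count x (s.eraseIdx k) + 1 := by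
    conv_lhs => rw [← pv_split s k h]
    rw [List.eraseIdx_eq_take_drop_succ, ← hx]
    simp [List.count_append]; omega
  rw [← List.count_pos_iff]
  omega

lemma pv_insert_eraseIdx (s : List Int) (k : Nat) (h : k < s.length) :
    PySem.List.insert (s.eraseIdx k) (k : Int) s[k] = s := by
  have hlen : k ≤ (s.eraseIdx k).length := by
    rw [List.length_eraseIdx_of_lt h]; omega
  rw [PySem.List.insert_natCast _ k _ hlen, List.eraseIdx_eq_take_drop_succ]
  rw [List.take_append_of_le_length (by simp; omega), List.take_take]
  rw [List.drop_append_of_le_length (by simp; omega)]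
  simp [min_self]

lemma pv_stepA_eq (s c : List Int) (k : Nat) (h : k < s.length) :
    pvStepA (s, c) ((k : Int), s[k]) = (s, pvStepS s c s[k]) := by
  unfold pvStepA pvStepS
  rw [PySem.List.pop?_natCast s k h]
  simp only [pv_insert_eraseIdx s k h]
  congr 1
  by_cases h2 : 2 ≤ List.count s[k] s <;> by_cases hm : s[k] ∈ c <;>
    simp [pv_mem_eraseIdx s k h, h2, hm]

lemma pv_foldA (s : List Int) (l : List (Int × Int)) (c : List Int)
    (hl : ∀ x ∈ l, ∃ (k : Nat) (h : k < s.length), x = ((k : Int), s[k])) :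
    l.foldl pvStepA (s, c) = (s, l.foldl (fun c ip => pvStepS s c ip.2) c) := by
  induction l generalizing c with
  | nil => rfl
  | cons x xs ih =>
    obtain ⟨k, hk, rfl⟩ := hl x (List.mem_cons_self)
    simp only [List.foldl_cons, pv_stepA_eq s c k hk]
    exact ih _ (fun y hy => hl y (List.mem_cons_of_mem _ hy))

lemma pv_invA (s : List Int) (u c : List Int) (hc : c.Nodup) :
    (u.foldl (pvStepS s) c).Nodup ∧
    ∀ p, p ∈ u.foldl (pvStepS s) c ↔ p ∈ c ∨ (2 ≤ List.count p s ∧ p ∈ u) := by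
  induction u generalizing c with
  | nil => simpa using hc
  | cons x xs ih =>
    rw [List.foldl_cons]
    by_cases hcond : 2 ≤ List.count x s ∧ x ∉ c
    · rw [show pvStepS s c x = c ++ [x] from by simp [pvStepS, hcond]]
      obtain ⟨h2, hnot⟩ := hcond
      obtain ⟨hn, hm⟩ := ih (c ++ [x])
        (by simp [List.nodup_append, hc]; exact fun a ha hax => hnot (hax ▸ ha))
      refine ⟨hn, fun p => ?_⟩
      rw [hm p]
      by_cases hpx : p = x <;> simp [hpx, h2] <;> tauto

    · rw [show pvStepS s c x = c from by simp [pvStepS, hcond]]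
      obtain ⟨hn, hm⟩ := ih c hc
      refine ⟨hn, fun p => ?_⟩
      rw [hm p]
      by_cases hpx : p = x
      · subst hpx
        by_cases hxc : p ∈ c
        · simp [hxc]
        · have : ¬ 2 ≤ List.count p s := fun h2 => hcond ⟨h2, hxc⟩
          simp [hxc, this]
      · simp [hpx]

lemma pv_invB (u t seen dups : List Int)
    (h1 : ∀ p, p ∈ seen ↔ p ∈ t) (h2 : dups.Nodup)
    (h3 : ∀ p, p ∈ dups ↔ 2 ≤ List.count p t) :
    (u.foldl pvStepB (seen, dups)).2.Nodup ∧
    ∀ p, p ∈ (u.foldl pvStepB (seen, dups)).2 ↔ 2 ≤ List.count p (t ++ u) := by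
  induction u generalizing t seen dups with
  | nil => simpa using ⟨h2, h3⟩
  | cons x xs ih =>
    rw [List.foldl_cons]
    by_cases hx : x ∈ seen
    · rw [show pvStepB (seen, dups) x = (seen, PySem.Set.add dups x) from by
        simp [pvStepB, hx]]
      have hxt : x ∈ t := (h1 x).1 hx
      have := ih (t ++ [x]) seen (PySem.Set.add dups x)
        (fun p => by by_cases hpx : p = x <;> simp [h1, hpx, hxt])
        (PySem.Set.nodup_add _ _ h2)
        (fun p => by
          rw [PySem.Set.mem_add, h3 p]
          by_cases hpx : p = x
          · subst hpx
            have hpos : 0 < List.count p t := List.count_pos_iff.2 hxt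
            simp [List.count_append]; omega
          · have h0 : List.count p [x] = 0 := List.count_eq_zero.2 (by simp [hpx])
            simp [List.count_append, h0, hpx])
      simpa using this
    · rw [show pvStepB (seen, dups) x = (PySem.Set.add seen x, dups) from by
        simp [pvStepB, hx]]
      have hxt : x ∉ t := fun h => hx ((h1 x).2 h)
      have hcx : List.count x t = 0 := List.count_eq_zero.2 hxt
      have := ih (t ++ [x]) (PySem.Set.add seen x) dups
        (fun p => by
          rw [PySem.Set.mem_add, h1 p]
          by_cases hpx : p = x <;> simp [hpx])
        h2
        (fun p => by
          rw [h3 p]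
          by_cases hpx : p = x
          · subst hpx
            simp [List.count_append, hcx]
          · have h0 : List.count p [x] = 0 := List.count_eq_zero.2 (by simp [hpx])
            simp [List.count_append, h0])
      simpa using this

lemma pv_portA (routes : List (List Int)) (time : Int) :
    countNumberOfCollisionInSametime routes time =
      ((((PySem.List.enumerate (pvPos routes time) 0).foldl pvStepA (pvPos routes time, [])).2).length : Int) := by
  unfold countNumberOfCollisionInSametime pvPos
  rw [PySem.List.foldl_pyRange_zero_pyGetD' routes []
    (fun acc r => if time < (r.length : Int) then acc ++ [PySem.List.pyGetD r time 0] else acc) []]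
  rfl

lemma pv_portB (routes : List (List Int)) (time : Int) :
    countNumberOfCollisionInSametime_alt routes time =
      ((((pvPos routes time).foldl pvStepB ([], [])).2).length : Int) := by
  rfl

lemma pv_main (routes : List (List Int)) (time : Int) :
    countNumberOfCollisionInSametime routes time = countNumberOfCollisionInSametime_alt routes time := by
  rw [pv_portA, pv_portB]
  set s := pvPos routes time with hs
  have henum : ∀ x ∈ PySem.List.enumerate s 0, ∃ (k : Nat) (h : k < s.length), x = ((k : Int), s[k]) := by
    intro x hx
    rw [PySem.List.mem_enumerate_iff] at hx
    obtain ⟨k, hk, rfl⟩ := hx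
    exact ⟨k, hk, by simp⟩
  rw [pv_foldA s _ [] henum]
  have hsnd : ∀ (f : List Int → Int → List Int) init,
      (PySem.List.enumerate s 0).foldl (fun c ip => f c ip.2) init = s.foldl f init := by
    intro f init
    conv_rhs => rw [← PySem.List.map_snd_enumerate s 0]
    rw [List.foldl_map]
  rw [hsnd (pvStepS s) []]
  obtain ⟨hAn, hAm⟩ := pv_invA s s [] List.nodup_nil
  obtain ⟨hBn, hBm⟩ := pv_invB s [] [] [] (by simp) List.nodup_nil (by simp)
  have hperm : (s.foldl (pvStepS s) []).Perm ((s.foldl pvStepB ([], [])).2) := by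
    rw [List.perm_ext_iff_of_nodup hAn hBn]
    intro p
    rw [hAm p, hBm p]
    simp only [List.mem_nil_iff, false_or, List.nil_append]
    constructor
    · exact fun h => h.1
    · exact fun h => ⟨h, List.count_pos_iff.1 (by omega)⟩
  exact congrArg _ hperm.length_eq

-- ===== VERDICT (by name: the statement is the Claim_ definition above) =====
theorem countNumberOfCollisionInSametime_spec : Claim_equal_countNumberOfCollisionInSametime := by
  intro routes time _ _
  unfold Spec_countNumberOfCollisionInSametime
  exact pv_main routes time
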